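-- pv_equiv track=rewrite | github.com/stanislavorlov/google-interview-prep | GoogleInterviewApp/7.Backtracking/Greedy/getSmallestString.py | getSmallestString2
-- ===== SOURCE A (Python) =====
-- def getSmallestString2(n: int, k: int) -> str:
--     char_arr = [''] * n
--     for position in range(n):
--         position_left = (n - position - 1)
--         if k > position_left * 26:
--             add = k - (position_left * 26)
--             char_arr[position] = chr(add - 1 + ord('a'))
--             k -= add
--         else:
--             char_arr[position] = 'a'
--             k -= 1
--
--     return ''.join(char_arr)
-- ===== SOURCE B (Python) =====
-- def getSmallestString2(n: int, k: int) -> str: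
--     if n <= 0:
--         return ''
--     extra = k - n
--     if extra <= 0:
--         return 'a' * n
--     if extra >= 25 * (n - 1):
--         return chr(97 + extra - 25 * (n - 1)) + 'z' * (n - 1)
--     z, r = divmod(extra, 25)
--     if r == 0:
--         return 'a' * (n - z) + 'z' * z
--     return 'a' * (n - 1 - z) + chr(97 + r) + 'z' * z
-- ===== Notes on version B (the rewrite author's own statement) =====
-- stated objective: faster
-- what changed: A fills the string with a per-position greedy loop deciding each character from the remaining budget; B computes the surplus extra = k - n once and builds the answer as three segments ('a'-prefix, one transition character, 'z'-suffix) from divmod(extra, 25) with C-level string repetition, no per-position loop.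
-- outside the precondition, e.g. on getSmallestString2(1, 1200000): A raises ValueError, B raises ValueError
import Mathlib
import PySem

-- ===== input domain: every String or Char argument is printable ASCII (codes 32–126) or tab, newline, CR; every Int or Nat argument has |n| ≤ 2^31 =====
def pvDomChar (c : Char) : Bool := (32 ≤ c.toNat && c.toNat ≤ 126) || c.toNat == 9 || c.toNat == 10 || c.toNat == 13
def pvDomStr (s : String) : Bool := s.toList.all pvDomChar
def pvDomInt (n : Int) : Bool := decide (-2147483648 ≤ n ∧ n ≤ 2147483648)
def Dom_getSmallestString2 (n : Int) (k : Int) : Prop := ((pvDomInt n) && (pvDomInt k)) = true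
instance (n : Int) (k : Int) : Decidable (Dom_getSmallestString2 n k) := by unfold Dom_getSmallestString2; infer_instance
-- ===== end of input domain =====

-- B replaces A's per-position greedy loop by a closed-form construction of the three
-- segments 'a'-prefix / one middle character / 'z'-suffix computed with divmod(extra, 25).

-- ===== PORT A =====
-- chr(x) is ported as Char.ofNat x.toNat: exact for valid non-surrogate code points,
-- which Pre_ guarantees (outside it Python's chr raises or yields a lone surrogate).
def getSmallestString2 (n : Int) (k : Int) : String :=
  let charArr : List String := List.replicate n.toNat ""      -- [''] * n
  let st := (PySem.List.pyRange 0 n 1).foldl (fun (st : List String × Int) position =>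
    let charArr := st.1
    let k := st.2
    let positionLeft := n - position - 1
    if positionLeft * 26 < k then                              -- if k > position_left * 26
      let add := k - positionLeft * 26
      (charArr.set position.toNat (Char.ofNat (add - 1 + 97).toNat).toString, k - add)
    else
      (charArr.set position.toNat "a", k - 1)) (charArr, k)
  PySem.Str.join "" st.1                                       -- ''.join(char_arr)

-- ===== PORT B =====
def getSmallestString2_alt (n : Int) (k : Int) : String :=
  if n ≤ 0 then "" else
  let extra := k - n
  if extra ≤ 0 then String.ofList (List.replicate n.toNat 'a') else   -- 'a' * n
  if 25 * (n - 1) ≤ extra then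
    String.ofList (Char.ofNat (97 + extra - 25 * (n - 1)).toNat :: List.replicate (n - 1).toNat 'z')
  else
    let z := PySem.Int.floordiv extra 25
    let r := PySem.Int.mod extra 25
    if r = 0 then String.ofList (List.replicate (n - z).toNat 'a' ++ List.replicate z.toNat 'z')
    else String.ofList (List.replicate (n - 1 - z).toNat 'a' ++
           Char.ofNat (97 + r).toNat :: List.replicate z.toNat 'z')

-- ===== PRECONDITION & SPEC =====
-- Pre_ excludes only the inputs where A's overflow character k-26(n-1)+96 is not a valid
-- Lean Char: above 0x10FFFF Python's chr raises ValueError (both programs raise), and in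
-- the surrogate band 0xD800–0xDFFF both programs return the same lone-surrogate str,
-- which Lean's String cannot represent.
def Pre_getSmallestString2 (n : Int) (k : Int) : Prop :=
  0 < n → 26 * (n - 1) < k →
    (k - 26 * (n - 1) + 96 < 0xD800 ∨
      (0xDFFF < k - 26 * (n - 1) + 96 ∧ k - 26 * (n - 1) + 96 ≤ 0x10FFFF))
instance (n : Int) (k : Int) : Decidable (Pre_getSmallestString2 n k) := by
  unfold Pre_getSmallestString2; infer_instance

def pvWitness_getSmallestString2 : Int × Int := (3, 27)

def Spec_getSmallestString2 (n : Int) (k : Int) (out : String) : Prop := out = getSmallestString2_alt n k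
instance (n : Int) (k : Int) (out : String) : Decidable (Spec_getSmallestString2 n k out) := by unfold Spec_getSmallestString2; infer_instance

-- ===== CLAIM (what is proved, stated in full; the proofs are below) =====
def Claim_equal_getSmallestString2 : Prop := ∀ (n : Int) (k : Int), Dom_getSmallestString2 n k → Pre_getSmallestString2 n k → Spec_getSmallestString2 n k (getSmallestString2 n k)

-- ===== LEMMAS AND PROOFS =====

-- The common greedy recursion both ports compute: first position forced low, rest recursive.
def pvCanon : Nat → Int → List Char
  | 0, _ => []
  | m + 1, k =>
    if (m : Int) * 26 < k then
      Char.ofNat (k - (m : Int) * 26 - 1 + 97).toNat :: List.replicate m 'z'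
    else
      'a' :: pvCanon m (k - 1)

lemma pvCanon_z (m : Nat) : pvCanon m ((m : Int) * 26) = List.replicate m 'z' := by
  induction m with
  | zero => rfl
  | succ m ih =>
    have h : (m : Int) * 26 < ((m + 1 : Nat) : Int) * 26 := by push_cast; omega
    simp only [pvCanon, if_pos h]
    have : (((m + 1 : Nat) : Int) * 26 - (m : Int) * 26 - 1 + 97).toNat = 122 := by
      push_cast; omega
    rw [this]
    rfl

lemma pvTakeSet {α : Type} (arr : List α) (p : Nat) (x : α) (h : p < arr.length) :
    (arr.set p x).take (p + 1) = arr.take p ++ [x] := by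
  induction arr generalizing p with
  | nil => simp at h
  | cons a as ih =>
    cases p with
    | zero => simp
    | succ q => simpa using ih q (by simpa using h)

-- A's loop over positions p .. p+j-1 writes exactly pvCanon j k into the tail of the array.
lemma pvLoopA (n : Int) : ∀ (j p : Nat) (arr : List String) (k : Int),
    arr.length = p + j → n = (p : Int) + (j : Int) →
    (((List.range' p j).map Int.ofNat).foldl (fun (st : List String × Int) position =>
      let charArr := st.1
      let k := st.2
      let positionLeft := n - position - 1
      if positionLeft * 26 < k then
        let add := k - positionLeft * 26
        (charArr.set position.toNat (Char.ofNat (add - 1 + 97).toNat).toString, k - add)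
      else
        (charArr.set position.toNat "a", k - 1)) (arr, k)).1
      = arr.take p ++ (pvCanon j k).map Char.toString := by
  intro j
  induction j with
  | zero =>
    intro p arr k hlen hn
    simp only [List.range', List.map_nil, List.foldl_nil, pvCanon, List.append_nil]
    exact (List.take_of_length_le (by omega)).symm
  | succ j ih =>
    intro p arr k hlen hn
    have hp : p < arr.length := by omega
    have hpl : n - (p : Int) - 1 = (j : Int) := by push_cast at hn ⊢; omega
    rw [List.range'_succ, List.map_cons, List.foldl_cons]
    simp only [Int.ofNat_eq_natCast, hpl, Int.toNat_natCast]
    by_cases h : (j : Int) * 26 < k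
    · rw [if_pos h]
      have hk' : k - (k - (j : Int) * 26) = (j : Int) * 26 := by ring
      rw [hk', ih (p + 1) _ _ (by simp [hlen]; omega) (by push_cast at hn ⊢; omega)]
      rw [pvCanon_z, pvTakeSet arr p _ hp]
      simp only [pvCanon, if_pos h, List.map_cons, List.append_assoc, List.singleton_append]
    · rw [if_neg h]
      rw [ih (p + 1) _ _ (by simp [hlen]; omega) (by push_cast at hn ⊢; omega)]
      rw [pvTakeSet arr p _ hp]
      simp only [pvCanon, if_neg h, List.map_cons, List.append_assoc, List.singleton_append]
      rfl

lemma pvJoin_singletons (cs : List Char) :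
    PySem.Str.join "" (cs.map Char.toString) = String.ofList cs := by
  rw [← String.toList_inj]
  rw [PySem.Str.toList_join]
  have : (cs.map Char.toString).map String.toList = cs.map (fun c => [c]) := by
    simp [List.map_map, Function.comp]
  rw [this, String.toList_ofList]
  simpa using PySem.Chars.join_nil_singletons cs

lemma pvA_eq_canon (n k : Int) : getSmallestString2 n k = String.ofList (pvCanon n.toNat k) := by
  simp only [getSmallestString2]
  rcases le_or_gt n 0 with hn | hn
  · have h0 : n.toNat = 0 := by omega
    rw [PySem.List.pyRange_one]
    simp only [show (n - 0).toNat = 0 by omega, List.range_zero, List.map_nil, List.foldl_nil,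
      h0, List.replicate_zero, pvCanon]
    simpa using pvJoin_singletons []
  · have hrange : PySem.List.pyRange 0 n 1 = (List.range' 0 n.toNat).map Int.ofNat := by
      rw [PySem.List.pyRange_one, List.range_eq_range',
        show (n - 0).toNat = n.toNat from by omega]
      exact List.map_congr_left (fun x _ => by simp [Int.ofNat_eq_natCast])
    rw [hrange, pvLoopA n n.toNat 0 (List.replicate n.toNat "") k (by simp) (by omega)]
    simp [pvJoin_singletons]

lemma pvCanon_closed (m : Nat) (e : Int) (hm : 0 < m) :
    pvCanon m (e + m) =
      if e ≤ 0 then List.replicate m 'a'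
      else if 25 * ((m : Int) - 1) ≤ e then
        Char.ofNat (97 + e - 25 * ((m : Int) - 1)).toNat :: List.replicate (m - 1) 'z'
      else if e % 25 = 0 then
        List.replicate (m - (e / 25).toNat) 'a' ++ List.replicate (e / 25).toNat 'z'
      else
        List.replicate (m - 1 - (e / 25).toNat) 'a' ++
          Char.ofNat (97 + e % 25).toNat :: List.replicate (e / 25).toNat 'z' := by
  induction m with
  | zero => exact absurd hm (by omega)
  | succ m ih =>
    have hql : 25 * (e / 25) + e % 25 = e := Int.mul_ediv_add_emod e 25
    have hr0 : 0 ≤ e % 25 := Int.emod_nonneg e (by norm_num)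
    have hr1 : e % 25 < 25 := Int.emod_lt_of_pos e (by norm_num)
    rcases Nat.eq_zero_or_pos m with hm0 | hm0
    · subst hm0
      simp only [pvCanon]
      norm_num
      split_ifs <;>
        first
          | rfl
          | omega
          | (have he0 : e = 0 := by omega
             subst he0
             decide)
          | (rw [show e + 97 = 97 + e from by ring])
    · have hIH := ih hm0
      simp only [pvCanon, Nat.cast_add, Nat.cast_one]
      by_cases htrig : (m : Int) * 26 < e + ((m : Int) + 1)
      · -- trigger: 25 * m ≤ e, hence 0 < e
        rw [if_pos htrig, if_neg (by omega), if_pos (by omega)]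
        have hc : e + ((m : Int) + 1) - (m : Int) * 26 - 1 + 97
            = 97 + e - 25 * (((m : Int) + 1) - 1) := by ring
        rw [hc]
        simp
      · -- no trigger: e < 25 * m
        rw [if_neg htrig, show e + ((m : Int) + 1) - 1 = e + (m : Int) from by ring, hIH]
        by_cases he : e ≤ 0
        · rw [if_pos he, if_pos he, List.replicate_succ]
        · rw [if_neg he, if_neg he,
            if_neg (show ¬25 * (((m : Int) + 1) - 1) ≤ e from by omega)]
          by_cases hov : 25 * ((m : Int) - 1) ≤ e
          · -- e / 25 = m - 1
            have hz : e / 25 = (m : Int) - 1 := by omega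
            have hzt : (e / 25).toNat = m - 1 := by omega
            rw [if_pos hov, hzt]
            by_cases hr : e % 25 = 0
            · rw [if_pos hr]
              have hc : 97 + e - 25 * ((m : Int) - 1) = 97 := by omega
              rw [hc, show m + 1 - (m - 1) = 2 from by omega]
              simp [List.replicate_succ]
            · rw [if_neg hr]
              have hc : 97 + e - 25 * ((m : Int) - 1) = 97 + e % 25 := by omega
              rw [hc, show m + 1 - 1 - (m - 1) = 1 from by omega]
              simp
          · -- e / 25 ≤ m - 2
            have hz2 : (e / 25).toNat ≤ m - 2 ∧ 2 ≤ m := by omega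
            rw [if_neg hov]
            by_cases hr : e % 25 = 0
            · rw [if_pos hr, if_pos hr,
                show m + 1 - (e / 25).toNat = (m - (e / 25).toNat) + 1 from by omega,
                List.replicate_succ, List.cons_append]
            · rw [if_neg hr, if_neg hr,
                show m + 1 - 1 - (e / 25).toNat = (m - 1 - (e / 25).toNat) + 1 from by omega,
                List.replicate_succ, List.cons_append]

lemma pvB_eq_canon (n k : Int) : getSmallestString2_alt n k = String.ofList (pvCanon n.toNat k) := by
  simp only [getSmallestString2_alt]
  rcases le_or_gt n 0 with hn | hn
  · rw [if_pos hn, show n.toNat = 0 from by omega]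
    rfl
  · rw [if_neg (by omega)]
    have hm : 0 < n.toNat := by omega
    have hcast : ((n.toNat : Nat) : Int) = n := by omega
    have hk : k = (k - n) + (n.toNat : Int) := by omega
    rw [show pvCanon n.toNat k = pvCanon n.toNat ((k - n) + (n.toNat : Int)) from by rw [← hk]]
    rw [pvCanon_closed n.toNat (k - n) hm, hcast]
    have hfd : PySem.Int.floordiv (k - n) 25 = (k - n) / 25 := by
      unfold PySem.Int.floordiv
      exact Int.fdiv_eq_ediv_of_nonneg _ (by norm_num)
    have hfm : PySem.Int.mod (k - n) 25 = (k - n) % 25 := by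
      unfold PySem.Int.mod
      simp [Int.fmod_eq_emod]
    rw [hfd, hfm]
    split_ifs with h1 h2 h3
    · rfl
    · rw [show (n - 1).toNat = n.toNat - 1 from by omega]
    · have hq0 : 0 ≤ (k - n) / 25 := Int.ediv_nonneg (by omega) (by norm_num)
      rw [show (n - (k - n) / 25).toNat = n.toNat - ((k - n) / 25).toNat from by omega]
    · have hq0 : 0 ≤ (k - n) / 25 := Int.ediv_nonneg (by omega) (by norm_num)
      rw [show (n - 1 - (k - n) / 25).toNat = n.toNat - 1 - ((k - n) / 25).toNat from by omega]

-- ===== VERDICT (by name: the statement is the Claim_ definition above) =====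
theorem getSmallestString2_spec : Claim_equal_getSmallestString2 := by
  intro n k _ _
  unfold Spec_getSmallestString2
  rw [pvA_eq_canon, pvB_eq_canon]
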